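-- pv_equiv track=rewrite | github.com/myd-0/unleakedtestbench | src/generate_cov_hf.py | truncate_conversation
-- ===== SOURCE A (Python) =====
-- def truncate_conversation(messages, tokenizer, max_length):
--     system_message = next((m for m in messages if m["role"] == "system"), None)
--     last_user_message = next((m for m in reversed(messages) if m["role"] == "user"), None)
--
--     truncated_messages = []
--     if system_message:
--         truncated_messages.append(system_message)
--     recent_assistant = [m for m in reversed(messages) if m["role"] == "assistant"]
--     if recent_assistant:
--         truncated_messages.append(recent_assistant[0])
--     if last_user_message:
--         truncated_messages.append(last_user_message)
--
--     return truncated_messages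
-- ===== SOURCE B (Python) =====
-- def truncate_conversation(messages, tokenizer, max_length):
--     system = last_user = last_assistant = None
--     for m in messages:
--         role = m["role"]
--         if role == "system" and system is None:
--             system = m
--         elif role == "user":
--             last_user = m
--         elif role == "assistant":
--             last_assistant = m
--     out = []
--     if system is not None:
--         out.append(system)
--     if last_assistant is not None:
--         out.append(last_assistant)
--     if last_user is not None:
--         out.append(last_user)
--     return out
-- ===== Notes on version B (the rewrite author's own statement) =====
-- stated objective: alternative
-- what changed: Replaces A's three separate scans (a forward scan for the first system message, a reversed scan for the last user message, and a reversed filter for the last assistant message) by one forward pass maintaining three state variables, then emits system/last-assistant/last-user in order.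
import Mathlib
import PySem

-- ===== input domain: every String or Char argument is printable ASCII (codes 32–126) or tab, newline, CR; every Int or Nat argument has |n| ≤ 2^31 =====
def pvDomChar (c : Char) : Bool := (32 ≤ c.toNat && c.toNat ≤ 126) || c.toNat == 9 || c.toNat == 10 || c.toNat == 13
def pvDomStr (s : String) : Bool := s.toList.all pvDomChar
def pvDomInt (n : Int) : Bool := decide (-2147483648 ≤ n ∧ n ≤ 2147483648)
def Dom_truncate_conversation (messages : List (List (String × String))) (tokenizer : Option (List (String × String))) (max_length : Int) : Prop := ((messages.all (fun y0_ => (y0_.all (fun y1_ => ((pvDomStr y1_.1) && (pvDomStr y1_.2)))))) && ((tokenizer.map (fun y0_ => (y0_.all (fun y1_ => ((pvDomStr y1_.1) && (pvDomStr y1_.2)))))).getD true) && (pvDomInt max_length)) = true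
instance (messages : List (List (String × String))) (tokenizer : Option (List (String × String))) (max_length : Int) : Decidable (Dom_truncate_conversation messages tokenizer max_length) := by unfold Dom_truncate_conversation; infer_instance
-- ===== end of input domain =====

-- B replaces A's three separate scans by ONE forward pass keeping first-system /
-- last-user / last-assistant state; same return value, alternative decomposition.


-- dict lookup m["role"] (first match in the association list); none = KeyError
def pvRole (m : List (String × String)) : Option String :=
  (m.find? (fun kv => kv.1 == "role")).map Prod.snd

-- ===== PORT A =====
def truncate_conversation (messages : List (List (String × String))) (_tokenizer : Option (List (String × String))) (_max_length : Int) : List (List (String × String)) :=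
  let system_message := messages.find? (fun m => pvRole m == some "system")
  let last_user_message := messages.reverse.find? (fun m => pvRole m == some "user")
  let t : List (List (String × String)) := []
  -- Python truthiness of a dict: not None and nonempty
  let t := match system_message with
           | some m => if m ≠ [] then t ++ [m] else t
           | none => t
  let recent_assistant := messages.reverse.filter (fun m => pvRole m == some "assistant")
  let t := match recent_assistant.head? with
           | some m => t ++ [m]
           | none => t
  let t := match last_user_message with
           | some m => if m ≠ [] then t ++ [m] else t
           | none => t
  t

-- ===== PORT B =====
def pvStep (st : Option (List (String × String)) × Option (List (String × String)) × Option (List (String × String)))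
    (m : List (String × String)) :
    Option (List (String × String)) × Option (List (String × String)) × Option (List (String × String)) :=
  let r := pvRole m
  if r == some "system" && st.1.isNone then (some m, st.2.1, st.2.2)
  else if r == some "user" then (st.1, some m, st.2.2)
  else if r == some "assistant" then (st.1, st.2.1, some m)
  else st

def pvOptList (o : Option (List (String × String))) : List (List (String × String)) :=
  match o with
  | some m => [m]
  | none => []

def truncate_conversation_alt (messages : List (List (String × String))) (_tokenizer : Option (List (String × String))) (_max_length : Int) : List (List (String × String)) :=
  let st := messages.foldl pvStep (none, none, none)
  pvOptList st.1 ++ pvOptList st.2.2 ++ pvOptList st.2.1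

-- ===== PRECONDITION & SPEC =====
-- A raises KeyError on any message lacking a "role" key; such inputs are excluded.
def Pre_truncate_conversation (messages : List (List (String × String))) (tokenizer : Option (List (String × String))) (max_length : Int) : Prop :=
  ∀ m ∈ messages, (pvRole m).isSome
instance (messages : List (List (String × String))) (tokenizer : Option (List (String × String))) (max_length : Int) : Decidable (Pre_truncate_conversation messages tokenizer max_length) := by unfold Pre_truncate_conversation; infer_instance

def pvWitness_truncate_conversation : (List (List (String × String))) × (Option (List (String × String))) × Int :=
  ([[("role", "system"), ("content", "s")], [("role", "user"), ("content", "hi")], [("role", "assistant"), ("content", "yo")]], none, 100)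

def Spec_truncate_conversation (messages : List (List (String × String))) (tokenizer : Option (List (String × String))) (max_length : Int) (out : List (List (String × String))) : Prop := out = truncate_conversation_alt messages tokenizer max_length
instance (messages : List (List (String × String))) (tokenizer : Option (List (String × String))) (max_length : Int) (out : List (List (String × String))) : Decidable (Spec_truncate_conversation messages tokenizer max_length out) := by unfold Spec_truncate_conversation; infer_instance

-- ===== CLAIM (what is proved, stated in full; the proofs are below) =====
def Claim_equal_truncate_conversation : Prop := ∀ (messages : List (List (String × String))) (tokenizer : Option (List (String × String))) (max_length : Int), Dom_truncate_conversation messages tokenizer max_length → Pre_truncate_conversation messages tokenizer max_length → Spec_truncate_conversation messages tokenizer max_length (truncate_conversation messages tokenizer max_length)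

-- ===== LEMMAS AND PROOFS =====

-- the single pass computes first-system / last-user / last-assistant
theorem pv_fold_spec (l : List (List (String × String))) (s lu la : Option (List (String × String))) :
    l.foldl pvStep (s, lu, la) =
      (s.or (l.find? (fun m => pvRole m == some "system")),
       (l.reverse.find? (fun m => pvRole m == some "user")).or lu,
       (l.reverse.find? (fun m => pvRole m == some "assistant")).or la) := by
  induction l generalizing s lu la with
  | nil => simp
  | cons a l ih =>
    rw [List.foldl_cons, ih]
    simp only [List.reverse_cons, List.find?_append, List.find?_cons]
    by_cases hs : pvRole a == some "system"
    · have hu : (pvRole a == some "user") = false := by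
        cases h : pvRole a <;> simp_all
      have ha : (pvRole a == some "assistant") = false := by
        cases h : pvRole a <;> simp_all
      cases s <;> simp [pvStep, hs, hu, ha, Option.or_assoc]
    · by_cases hu : pvRole a == some "user"
      · have ha : (pvRole a == some "assistant") = false := by
          cases h : pvRole a <;> simp_all
        simp [pvStep, hs, hu, ha, Option.or_assoc]
      · by_cases ha : pvRole a == some "assistant"
        · simp [pvStep, hs, hu, ha, Option.or_assoc]
        · simp [pvStep, hs, hu, ha, Option.or_assoc]

theorem pv_head_filter (p : List (String × String) → Bool) (l : List (List (String × String))) :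
    (l.filter p).head? = l.find? p := by
  induction l with
  | nil => rfl
  | cons a l ih => by_cases h : p a <;> simp [List.filter_cons, List.find?_cons, h, ih]

theorem pv_role_ne_nil (m : List (String × String)) (r : String) (h : pvRole m == some r) : m ≠ [] := by
  cases m <;> simp_all [pvRole]

-- ===== VERDICT (by name: the statement is the Claim_ definition above) =====
theorem truncate_conversation_spec : Claim_equal_truncate_conversation := by
  intro messages tokenizer max_length _ _
  unfold Spec_truncate_conversation
  simp only [truncate_conversation, truncate_conversation_alt, pv_fold_spec, pv_head_filter,
    Option.none_or, Option.or_none]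
  cases hS : messages.find? (fun m => pvRole m == some "system") with
  | none =>
    cases hU : messages.reverse.find? (fun m => pvRole m == some "user") with
    | none => cases hA : messages.reverse.find? (fun m => pvRole m == some "assistant") <;> simp [pvOptList]
    | some mu =>
      have := pv_role_ne_nil mu "user" (by simpa using List.find?_some hU)
      cases hA : messages.reverse.find? (fun m => pvRole m == some "assistant") <;> simp_all [pvOptList]
  | some ms =>
    have := pv_role_ne_nil ms "system" (by simpa using List.find?_some hS)
    cases hU : messages.reverse.find? (fun m => pvRole m == some "user") with
    | none => cases hA : messages.reverse.find? (fun m => pvRole m == some "assistant") <;> simp_all [pvOptList]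
    | some mu =>
      have := pv_role_ne_nil mu "user" (by simpa using List.find?_some hU)
      cases hA : messages.reverse.find? (fun m => pvRole m == some "assistant") <;> simp_all [pvOptList]
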